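-- pv_equiv track=rewrite | github.com/datamusee/scrutart | src/analyses/analysesJoconde/traitementTechniquesMateriaux.py | grouper_techniques
-- ===== SOURCE A (Python) =====
-- from collections import defaultdict
--
-- def grouper_techniques(techniques_dict):
--     """Groupe les techniques similaires"""
--     groupes = defaultdict(list)
--
--     # Définir les groupes de techniques
--     groupe_peinture = ['aquarelle', 'huile', 'acrylique', 'gouache', 'tempera']
--     groupe_dessin = ['crayon', 'fusain', 'sanguine', 'pastel', 'crayon gras',
--                      'graphite', 'pierre noire']
--     groupe_encre = ['encre', 'encre de chine', 'sépia']
--     groupe_gravure = ['gravure', 'eau-forte', 'lithographie', 'sérigraphie']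
--
--     for technique in techniques_dict.keys():
--         tech_lower = technique.lower()
--
--         if any(mot in tech_lower for mot in groupe_peinture):
--             groupes['peinture'].append(technique)
--         elif any(mot in tech_lower for mot in groupe_dessin):
--             groupes['dessin'].append(technique)
--         elif any(mot in tech_lower for mot in groupe_encre):
--             groupes['encre'].append(technique)
--         elif any(mot in tech_lower for mot in groupe_gravure):
--             groupes['gravure'].append(technique)
--         else:
--             groupes['autre'].append(technique)
--
--     return dict(groupes)
-- ===== SOURCE B (Python) =====
-- GROUPES = [
--     ('peinture', ['aquarelle', 'huile', 'acrylique', 'gouache', 'tempera']),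
--     ('dessin', ['crayon', 'fusain', 'sanguine', 'pastel', 'crayon gras',
--                 'graphite', 'pierre noire']),
--     ('encre', ['encre', 'encre de chine', 'sépia']),
--     ('gravure', ['gravure', 'eau-forte', 'lithographie', 'sérigraphie']),
-- ]
--
-- def _classer(nom):
--     bas = nom.lower()
--     for categorie, mots in GROUPES:
--         if any(mot in bas for mot in mots):
--             return categorie
--     return 'autre'
--
-- def grouper_techniques(techniques_dict):
--     """Groupe les techniques similaires (staged: classify all, then gather per category)."""
--     noms = list(techniques_dict)
--     cats = [_classer(n) for n in noms]
--     ordre = list(dict.fromkeys(cats))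
--     return {c: [n for n, k in zip(noms, cats) if k == c] for c in ordre}
-- ===== Notes on version B (the rewrite author's own statement) =====
-- stated objective: alternative
-- what changed: Replaces A's single pass that appends each technique into a mutable defaultdict by staged passes: classify every technique once, deduplicate the category sequence to get the key order, then build each category's list by gathering over the zipped (name, category) pairs.
import Mathlib
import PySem

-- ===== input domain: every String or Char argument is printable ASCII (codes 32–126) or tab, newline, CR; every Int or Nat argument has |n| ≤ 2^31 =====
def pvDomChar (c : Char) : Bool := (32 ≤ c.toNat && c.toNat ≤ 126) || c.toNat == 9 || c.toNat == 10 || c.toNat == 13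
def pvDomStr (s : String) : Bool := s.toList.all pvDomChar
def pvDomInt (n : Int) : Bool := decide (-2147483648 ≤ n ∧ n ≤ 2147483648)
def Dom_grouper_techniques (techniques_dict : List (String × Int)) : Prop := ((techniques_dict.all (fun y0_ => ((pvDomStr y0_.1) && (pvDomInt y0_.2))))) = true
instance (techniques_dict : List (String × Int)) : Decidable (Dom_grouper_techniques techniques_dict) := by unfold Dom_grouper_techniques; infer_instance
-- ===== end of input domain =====

-- B replaces A's one-pass defaultdict-append grouping by staged passes: classify every
-- technique once, dedup the category sequence for the key order, gather each category's
-- members from the zipped (name, category) pairs (objective: alternative; same cost).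

-- ===== PORT A =====
-- groupes['cat'].append(t) on a defaultdict(list) is exactly Dict.modify cat [] (· ++ [t])
def grouper_techniques (techniques_dict : List (String × Int)) : List (String × List String) :=
  let groupe_peinture : List String := ["aquarelle", "huile", "acrylique", "gouache", "tempera"]
  let groupe_dessin : List String := ["crayon", "fusain", "sanguine", "pastel", "crayon gras",
                                      "graphite", "pierre noire"]
  let groupe_encre : List String := ["encre", "encre de chine", "sépia"]
  let groupe_gravure : List String := ["gravure", "eau-forte", "lithographie", "sérigraphie"]
  let groupes : PySem.Dict String (List String) :=
    ((PySem.Dict.ofList techniques_dict).keys).foldl (fun g technique =>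
      let tech_lower := PySem.Str.lower technique
      if groupe_peinture.any (fun mot => PySem.Str.isIn mot tech_lower) then
        g.modify "peinture" [] (· ++ [technique])
      else if groupe_dessin.any (fun mot => PySem.Str.isIn mot tech_lower) then
        g.modify "dessin" [] (· ++ [technique])
      else if groupe_encre.any (fun mot => PySem.Str.isIn mot tech_lower) then
        g.modify "encre" [] (· ++ [technique])
      else if groupe_gravure.any (fun mot => PySem.Str.isIn mot tech_lower) then
        g.modify "gravure" [] (· ++ [technique])
      else
        g.modify "autre" [] (· ++ [technique])) PySem.Dict.empty
  groupes.items

-- ===== PORT B =====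
def pvGroupes : List (String × List String) :=
  [("peinture", ["aquarelle", "huile", "acrylique", "gouache", "tempera"]),
   ("dessin", ["crayon", "fusain", "sanguine", "pastel", "crayon gras",
               "graphite", "pierre noire"]),
   ("encre", ["encre", "encre de chine", "sépia"]),
   ("gravure", ["gravure", "eau-forte", "lithographie", "sérigraphie"])]

-- the 'for categorie, mots in GROUPES: if any(...): return categorie' loop = first match in pvGroupes
def pvClasser (nom : String) : String :=
  let bas := PySem.Str.lower nom
  (((pvGroupes.find? (fun p => p.2.any (fun mot => PySem.Str.isIn mot bas))).map Prod.fst).getD "autre")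

def grouper_techniques_alt (techniques_dict : List (String × Int)) : List (String × List String) :=
  let noms := (PySem.Dict.ofList techniques_dict).keys
  let cats := noms.map pvClasser
  let ordre := PySem.List.dedup cats
  ordre.map (fun c => (c, ((noms.zip cats).filter (fun p => p.2 == c)).map (·.1)))

-- ===== PRECONDITION & SPEC =====
def Spec_grouper_techniques (techniques_dict : List (String × Int)) (out : List (String × List String)) : Prop := out = grouper_techniques_alt techniques_dict
instance (techniques_dict : List (String × Int)) (out : List (String × List String)) : Decidable (Spec_grouper_techniques techniques_dict out) := by unfold Spec_grouper_techniques; infer_instance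

-- ===== CLAIM (what is proved, stated in full; the proofs are below) =====
def Claim_equal_grouper_techniques : Prop := ∀ (techniques_dict : List (String × Int)), Dom_grouper_techniques techniques_dict → Spec_grouper_techniques techniques_dict (grouper_techniques techniques_dict)

-- ===== LEMMAS AND PROOFS =====

-- first match over a cons of (category, keywords): the head's category if a keyword matches
theorem find?_cat_cons (Q : String → Bool) (c : String) (kws : List String)
    (rest : List (String × List String)) :
    ((((c, kws) :: rest).find? (fun p => p.2.any Q)).map Prod.fst).getD "autre"
      = if kws.any Q then c
        else (((rest.find? (fun p => p.2.any Q)).map Prod.fst).getD "autre") := by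
  simp only [List.find?_cons]
  cases h : kws.any Q
  · simp
  · simp

-- A's elif chain of any() tests computes exactly B's first-match category
theorem classer_eq (t : String) :
    pvClasser t
      = (if (["aquarelle", "huile", "acrylique", "gouache", "tempera"] : List String).any
            (fun mot => PySem.Str.isIn mot (PySem.Str.lower t)) then "peinture"
        else if (["crayon", "fusain", "sanguine", "pastel", "crayon gras", "graphite",
                  "pierre noire"] : List String).any (fun mot => PySem.Str.isIn mot (PySem.Str.lower t)) then "dessin"
        else if (["encre", "encre de chine", "sépia"] : List String).any
            (fun mot => PySem.Str.isIn mot (PySem.Str.lower t)) then "encre"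
        else if (["gravure", "eau-forte", "lithographie", "sérigraphie"] : List String).any
            (fun mot => PySem.Str.isIn mot (PySem.Str.lower t)) then "gravure"
        else "autre") := by
  show (((("peinture", ["aquarelle", "huile", "acrylique", "gouache", "tempera"]) ::
          ("dessin", ["crayon", "fusain", "sanguine", "pastel", "crayon gras",
                      "graphite", "pierre noire"]) ::
          ("encre", ["encre", "encre de chine", "sépia"]) ::
          ("gravure", ["gravure", "eau-forte", "lithographie", "sérigraphie"]) ::
          ([] : List (String × List String))).find?
            (fun p => p.2.any (fun mot => PySem.Str.isIn mot (PySem.Str.lower t)))).map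
            Prod.fst).getD "autre" = _
  rw [find?_cat_cons, find?_cat_cons, find?_cat_cons, find?_cat_cons]
  rfl

-- gathering from the zipped pairs = gathering from (category, name) pairs
theorem zip_filter_eq (noms : List String) (c : String) :
    (((noms.zip (noms.map pvClasser)).filter (fun p => p.2 == c)).map (·.1))
      = (((noms.map (fun t => (pvClasser t, t))).filter (fun p => p.1 == c)).map (·.2)) := by
  induction noms with
  | nil => rfl
  | cons n ns ih =>
    simp only [List.map_cons, List.zip_cons_cons, List.filter_cons]
    cases h : (pvClasser n == c)
    · simp [ih]
    · simp [ih]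

-- one loop step of A = modify at the classified category
theorem pas_eq (g : PySem.Dict String (List String)) (t : String) :
    (if (["aquarelle", "huile", "acrylique", "gouache", "tempera"] : List String).any
          (fun mot => PySem.Str.isIn mot (PySem.Str.lower t)) then
        g.modify "peinture" [] (· ++ [t])
      else if (["crayon", "fusain", "sanguine", "pastel", "crayon gras", "graphite",
          "pierre noire"] : List String).any (fun mot => PySem.Str.isIn mot (PySem.Str.lower t)) then
        g.modify "dessin" [] (· ++ [t])
      else if (["encre", "encre de chine", "sépia"] : List String).any
          (fun mot => PySem.Str.isIn mot (PySem.Str.lower t)) then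
        g.modify "encre" [] (· ++ [t])
      else if (["gravure", "eau-forte", "lithographie", "sérigraphie"] : List String).any
          (fun mot => PySem.Str.isIn mot (PySem.Str.lower t)) then
        g.modify "gravure" [] (· ++ [t])
      else
        g.modify "autre" [] (· ++ [t]))
      = g.modify (pvClasser t) [] (· ++ [t]) := by
  rw [classer_eq t]
  split_ifs <;> rfl

-- ===== VERDICT (by name: the statement is the Claim_ definition above) =====
theorem grouper_techniques_spec : Claim_equal_grouper_techniques := by
  intro techniques_dict _
  show grouper_techniques techniques_dict = grouper_techniques_alt techniques_dict
  unfold grouper_techniques grouper_techniques_alt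
  dsimp only
  set noms := (PySem.Dict.ofList techniques_dict).keys with hnoms
  -- rewrite A's fold step into the classified form, then into a fold over (cat, name) pairs
  have hstep : noms.foldl (fun g technique =>
      let tech_lower := PySem.Str.lower technique
      if (["aquarelle", "huile", "acrylique", "gouache", "tempera"] : List String).any
          (fun mot => PySem.Str.isIn mot tech_lower) then
        g.modify "peinture" [] (· ++ [technique])
      else if (["crayon", "fusain", "sanguine", "pastel", "crayon gras", "graphite",
          "pierre noire"] : List String).any (fun mot => PySem.Str.isIn mot tech_lower) then
        g.modify "dessin" [] (· ++ [technique])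
      else if (["encre", "encre de chine", "sépia"] : List String).any
          (fun mot => PySem.Str.isIn mot tech_lower) then
        g.modify "encre" [] (· ++ [technique])
      else if (["gravure", "eau-forte", "lithographie", "sérigraphie"] : List String).any
          (fun mot => PySem.Str.isIn mot tech_lower) then
        g.modify "gravure" [] (· ++ [technique])
      else
        g.modify "autre" [] (· ++ [technique])) PySem.Dict.empty
      = (noms.map (fun t => (pvClasser t, t))).foldl
          (fun g p => g.modify p.1 [] (· ++ [p.2])) PySem.Dict.empty := by
    rw [List.foldl_map]
    apply List.foldl_ext
    intro g t _
    exact pas_eq g t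
  rw [hstep]
  set P := noms.map (fun t => (pvClasser t, t)) with hP
  set d := P.foldl (fun g p => g.modify p.1 [] (· ++ [p.2])) PySem.Dict.empty with hd
  have hnd : d.keys.Nodup := by
    rw [hd]
    exact PySem.Dict.nodup_keys_foldl_modify_key P Prod.fst [] (fun g p => (· ++ [p.2]))
      PySem.Dict.empty PySem.Dict.nodup_keys_empty
  have hkeys : d.keys = PySem.List.dedup (noms.map pvClasser) := by
    rw [hd]
    rw [PySem.Dict.keys_foldl_modify_key]
    simp [hP, List.map_map, Function.comp_def, PySem.Set.update_nil_left]
  rw [PySem.Dict.items_eq_map_keys d hnd []]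
  rw [hkeys]
  apply List.map_congr_left
  intro c _
  have hg : d.getD c [] = (P.filter (fun p => p.1 == c)).map (·.2) := by
    rw [hd, PySem.Dict.getD_foldl_modify_append]
    simp
  rw [hg, hP, zip_filter_eq]
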